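-- pv_equiv track=rewrite | github.com/123321456-gif/Canoverse | downstream_task/orientation_estimation/src/utils/anno_utils.py | generate_circle_points
-- ===== SOURCE A (Python) =====
-- import math
--
-- def generate_circle_points(center_x, center_y, radius, image_width, image_height):
--
--     """
--     生成以点击点为中心的圆形区域内所有点的坐标，且不超出图像边界。
--
--     :param center_x: 圆心的x坐标
--     :param center_y: 圆心的y坐标
--     :param radius: 圆的半径
--     :param image_width: 图像的宽度
--     :param image_height: 图像的高度
--     :return: 圆内点的坐标列表
--     """
--     points = []
--     # 计算圆的边界，确保不超出图像
--     left = max(0, center_x - radius)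
--     right = min(image_width, center_x + radius + 1)
--     top = max(0, center_y - radius)
--     bottom = min(image_height, center_y + radius + 1)
--
--     for i in range(top, bottom):
--         for j in range(left, right):
--             # 计算当前点到圆心的距离
--             distance = math.sqrt((i - center_y) ** 2 + (j - center_x) ** 2)
--             # 如果点在圆内或圆上，则添加到列表中
--             if distance <= radius:
--                 points.append((j, i))  # 注意：图像坐标通常是(y, x)
--
--     return points
-- ===== SOURCE B (Python) =====
-- import math
--
-- def generate_circle_points(center_x, center_y, radius, image_width, image_height):
--     points = []
--     left = max(0, center_x - radius)
--     right = min(image_width, center_x + radius + 1)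
--     for i in range(max(0, center_y - radius), min(image_height, center_y + radius + 1)):
--         # row i intersects the disc in a contiguous horizontal run of width 2*dx+1
--         dx = math.isqrt(radius * radius - (i - center_y) ** 2)
--         points.extend((j, i) for j in range(max(left, center_x - dx), min(right, center_x + dx + 1)))
--     return points
-- ===== Notes on version B (the rewrite author's own statement) =====
-- stated objective: alternative
-- what changed: Instead of scanning the whole clipped bounding box and distance-testing every point with float sqrt, B computes per row the half-width dx = isqrt(r^2 - dy^2) and emits the clipped contiguous run of that row directly, so corner points are never visited and no per-point test is done.
-- outside the precondition, e.g. on generate_circle_points(-100000000, -1, 100000000, 1, 1): A returns [(0, 0)], B returns []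
import Mathlib
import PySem

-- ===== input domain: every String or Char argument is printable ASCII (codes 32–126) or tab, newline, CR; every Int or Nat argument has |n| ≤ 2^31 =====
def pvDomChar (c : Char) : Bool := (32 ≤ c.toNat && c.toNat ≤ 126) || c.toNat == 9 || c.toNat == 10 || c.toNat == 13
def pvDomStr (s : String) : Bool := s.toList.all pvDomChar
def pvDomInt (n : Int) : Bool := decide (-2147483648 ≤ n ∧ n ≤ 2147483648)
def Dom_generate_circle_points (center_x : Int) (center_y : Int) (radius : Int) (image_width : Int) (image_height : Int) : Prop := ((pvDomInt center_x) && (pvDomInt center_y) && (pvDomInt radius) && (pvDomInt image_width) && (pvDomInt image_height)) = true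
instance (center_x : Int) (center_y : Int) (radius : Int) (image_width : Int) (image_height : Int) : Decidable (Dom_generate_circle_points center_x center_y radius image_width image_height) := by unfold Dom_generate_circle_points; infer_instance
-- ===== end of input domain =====

-- B replaces A's per-point float-sqrt box scan with one clipped contiguous row run per line, computed by an integer isqrt per row (alternative algorithm, same result).

-- ===== PORT A =====
-- A-side helpers: an EXACT integer model of the Python float computation
-- `math.sqrt(s) <= r` for integers 0 ≤ s < 2^63, 0 ≤ r < 2^52 (the range Dom allows):
-- pvRnd53 is CPython's int→double conversion (round to 53 significant bits, ties to even);
-- math.sqrt is correctly rounded, and Python compares the resulting double with the int r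
-- exactly, so the comparison holds iff √(pvRnd53 s) ≤ r + ulp(r)/2, which squared and
-- scaled by 4^(53-e) (e = ⌊log2 r⌋) is the integer inequality below (the tie rounds to r
-- because r's significand is even for r < 2^52).
def pvRnd53 (s : Int) : Int :=
  if s < 2 ^ 53 then s
  else
    let n := s.toNat
    let k := n.log2 - 52
    let q := n / 2 ^ k
    let rem := n % 2 ^ k
    let half := 2 ^ (k - 1)
    ((if half < rem ∨ (rem = half ∧ q % 2 = 1) then q + 1 else q) * 2 ^ k : Nat)

def pvSqrtLe (s r : Int) : Bool :=
  if r < 0 then false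
  else if r = 0 then decide (s ≤ 0)
  else decide (pvRnd53 s * 4 ^ (53 - r.toNat.log2) ≤ (r * 2 ^ (53 - r.toNat.log2) + 1) ^ 2)

def generate_circle_points (center_x : Int) (center_y : Int) (radius : Int) (image_width : Int) (image_height : Int) : List (Int × Int) :=
  let left := max 0 (center_x - radius)
  let right := min image_width (center_x + radius + 1)
  let top := max 0 (center_y - radius)
  let bottom := min image_height (center_y + radius + 1)
  (PySem.List.pyRange top bottom 1).foldl (fun pts i =>
    (PySem.List.pyRange left right 1).foldl (fun pts j =>
      -- `distance = math.sqrt(...)` then `if distance <= radius`, via the exact model above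
      if pvSqrtLe ((i - center_y) ^ 2 + (j - center_x) ^ 2) radius then pts ++ [(j, i)] else pts) pts) []

-- ===== PORT B =====
def generate_circle_points_alt (center_x : Int) (center_y : Int) (radius : Int) (image_width : Int) (image_height : Int) : List (Int × Int) :=
  let left := max 0 (center_x - radius)
  let right := min image_width (center_x + radius + 1)
  (PySem.List.pyRange (max 0 (center_y - radius)) (min image_height (center_y + radius + 1)) 1).foldl (fun pts i =>
    -- math.isqrt(t) with t = r*r - (i-cy)**2 ≥ 0 for every i this loop visits
    let dx : Int := (Nat.sqrt (radius * radius - (i - center_y) ^ 2).toNat : Int)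
    pts ++ (PySem.List.pyRange (max left (center_x - dx)) (min right (center_x + dx + 1)) 1).map (fun j => (j, i))) []

-- ===== PRECONDITION & SPEC =====
-- Pre_ excludes radii above 2^25, where A's float-sqrt membership test can misclassify a
-- boundary lattice point (squared distances may exceed 2^53 and round); within the bound
-- every squared distance A tests is ≤ 2·(2^25)^2 < 2^53, the float arithmetic is exact and
-- A's test coincides with B's integer test.
def Pre_generate_circle_points (center_x : Int) (center_y : Int) (radius : Int) (image_width : Int) (image_height : Int) : Prop :=
  radius ≤ 33554432
instance (center_x : Int) (center_y : Int) (radius : Int) (image_width : Int) (image_height : Int) : Decidable (Pre_generate_circle_points center_x center_y radius image_width image_height) := by unfold Pre_generate_circle_points; infer_instance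
def pvWitness_generate_circle_points : Int × Int × Int × Int × Int := (2, 2, 2, 5, 5)
def Spec_generate_circle_points (center_x : Int) (center_y : Int) (radius : Int) (image_width : Int) (image_height : Int) (out : List (Int × Int)) : Prop := out = generate_circle_points_alt center_x center_y radius image_width image_height
instance (center_x : Int) (center_y : Int) (radius : Int) (image_width : Int) (image_height : Int) (out : List (Int × Int)) : Decidable (Spec_generate_circle_points center_x center_y radius image_width image_height out) := by unfold Spec_generate_circle_points; infer_instance

-- ===== CLAIM (what is proved, stated in full; the proofs are below) =====
def Claim_equal_generate_circle_points : Prop := ∀ (center_x : Int) (center_y : Int) (radius : Int) (image_width : Int) (image_height : Int), Dom_generate_circle_points center_x center_y radius image_width image_height → Pre_generate_circle_points center_x center_y radius image_width image_height → Spec_generate_circle_points center_x center_y radius image_width image_height (generate_circle_points center_x center_y radius image_width image_height)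

-- ===== LEMMAS AND PROOFS =====

-- under Pre_'s radius bound, the float test equals the integer test on every point A visits
theorem pvSqrtLe_eq (s r : Int) (hr0 : 0 ≤ r) (hr : r ≤ 33554432) (hs0 : 0 ≤ s)
    (hs : s ≤ 2 * r * r) : pvSqrtLe s r = decide (s ≤ r ^ 2) := by
  unfold pvSqrtLe
  rcases lt_trichotomy r 0 with h | h | h
  · omega
  · subst h; simp
  · rw [if_neg (by omega), if_neg (by omega)]
    have hx : pvRnd53 s = s := by
      unfold pvRnd53
      rw [if_pos (by nlinarith)]
    have he : r.toNat.log2 ≤ 25 := by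
      have h26 : r.toNat < 2 ^ 26 := by omega
      have := (Nat.log2_lt (by omega)).mpr h26
      omega
    set e := r.toNat.log2 with hedef
    set P : Int := 2 ^ (53 - e) with hP
    have h4 : (4 : Int) ^ (53 - e) = P ^ 2 := by
      rw [hP, ← pow_mul, show (4 : Int) = 2 ^ 2 from by norm_num, ← pow_mul]
      ring_nf
    have hPbig : 2 ^ 28 ≤ P := by
      rw [hP]
      exact pow_le_pow_right₀ (by norm_num) (by omega)
    have hP2r : 2 * r + 2 ≤ P := by nlinarith
    rw [hx, h4]
    congr 1
    simp only [eq_iff_iff]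
    constructor <;> intro hcmp
    · by_contra hgt
      push_neg at hgt
      have h1 : r ^ 2 + 1 ≤ s := by omega
      nlinarith
    · nlinarith

-- filtering a unit-step range by membership in [lo, hi] yields the clipped range
theorem filter_pyRange_interval (a b lo hi : Int) :
    (PySem.List.pyRange a b 1).filter (fun j => decide (lo ≤ j ∧ j ≤ hi)) =
      PySem.List.pyRange (max a lo) (min b (hi + 1)) 1 := by
  by_cases hab : b ≤ a
  · rw [PySem.List.pyRange_one_eq_nil hab, List.filter_nil]
    exact (PySem.List.pyRange_one_eq_nil (by omega)).symm
  · push_neg at hab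
    have hrec : (PySem.List.pyRange (a + 1) b 1).filter (fun j => decide (lo ≤ j ∧ j ≤ hi)) =
        PySem.List.pyRange (max (a + 1) lo) (min b (hi + 1)) 1 := filter_pyRange_interval (a + 1) b lo hi
    rw [PySem.List.pyRange_one_cons hab, List.filter_cons]
    by_cases hmem : lo ≤ a ∧ a ≤ hi
    · simp only [hmem, and_self, decide_true, if_true, hrec]
      have h1 : max (a + 1) lo = a + 1 := by omega
      have h2 : max a lo = a := by omega
      rw [h1, h2]
      exact (PySem.List.pyRange_one_cons (show a < min b (hi + 1) by omega)).symm
    · simp only [decide_eq_true_eq, hmem, if_false, hrec]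
      by_cases hlo : a < lo
      · have hmax : max (a + 1) lo = max a lo := by omega
        rw [hmax]
      · -- then hi < a: both sides empty
        have hhi : hi < a := by omega
        rw [PySem.List.pyRange_one_eq_nil (by omega), PySem.List.pyRange_one_eq_nil (by omega)]
termination_by (b - a).toNat
decreasing_by omega

theorem row_eq (center_x center_y radius left right i : Int)
    (hpre : radius ≤ 33554432)
    (hL : center_x - radius ≤ left) (hR : right ≤ center_x + radius + 1)
    (hi : center_y - radius ≤ i ∧ i ≤ center_y + radius) (pts : List (Int × Int)) :
    (PySem.List.pyRange left right 1).foldl (fun pts j =>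
        if pvSqrtLe ((i - center_y) ^ 2 + (j - center_x) ^ 2) radius then pts ++ [(j, i)] else pts) pts =
      pts ++ (PySem.List.pyRange (max left (center_x - (Nat.sqrt (radius * radius - (i - center_y) ^ 2).toNat : Int)))
        (min right (center_x + (Nat.sqrt (radius * radius - (i - center_y) ^ 2).toNat : Int) + 1)) 1).map (fun j => (j, i)) := by
  have hr0 : 0 ≤ radius := by omega
  set t : Int := radius * radius - (i - center_y) ^ 2 with ht
  have ht0 : 0 ≤ t := by nlinarith [hi.1, hi.2]
  set dx : Int := (Nat.sqrt t.toNat : Int) with hdx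
  have hcond : ∀ j : Int, center_x - radius ≤ j → j ≤ center_x + radius →
      (pvSqrtLe ((i - center_y) ^ 2 + (j - center_x) ^ 2) radius =
        decide (center_x - dx ≤ j ∧ j ≤ center_x + dx)) := by
    intro j hj1 hj2
    rw [pvSqrtLe_eq _ _ hr0 hpre (by positivity) (by nlinarith [hi.1, hi.2])]
    have h1 : ((i - center_y) ^ 2 + (j - center_x) ^ 2 ≤ radius ^ 2) ↔ (j - center_x) ^ 2 ≤ t := by
      constructor <;> intro h <;> nlinarith
    have key : ((j - center_x).natAbs : Int) * ((j - center_x).natAbs : Int) = (j - center_x) ^ 2 := by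
      rw [Int.natAbs_mul_self']; ring
    have h2 : ((j - center_x) ^ 2 ≤ t) ↔ (j - center_x).natAbs ≤ Nat.sqrt t.toNat := by
      rw [Nat.le_sqrt]
      constructor <;> intro h
      · have h' : ((j - center_x).natAbs : Int) * ((j - center_x).natAbs : Int) ≤ (t.toNat : Int) := by
          rw [key, Int.toNat_of_nonneg ht0]; exact h
        exact_mod_cast h'
      · have h' : ((j - center_x).natAbs : Int) * ((j - center_x).natAbs : Int) ≤ (t.toNat : Int) := by
          exact_mod_cast h
        rw [key, Int.toNat_of_nonneg ht0] at h'
        exact h'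
    have h3 : ((j - center_x).natAbs ≤ Nat.sqrt t.toNat) ↔ (center_x - dx ≤ j ∧ j ≤ center_x + dx) := by
      rw [hdx]; omega
    by_cases hc : center_x - dx ≤ j ∧ j ≤ center_x + dx
    · simp only [hc]
      exact decide_eq_true (by rw [h1, h2, h3]; exact hc)
    · simp only [hc, decide_false]
      exact decide_eq_false (fun h => hc (by rw [h1, h2, h3] at h; exact h))
  have hfold := PySem.List.foldl_append_if
    (l := PySem.List.pyRange left right 1)
    (p := fun j => decide (center_x - dx ≤ j ∧ j ≤ center_x + dx))
    (f := fun j => ((j, i) : Int × Int)) (acc := pts)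
  calc (PySem.List.pyRange left right 1).foldl (fun pts j =>
        if pvSqrtLe ((i - center_y) ^ 2 + (j - center_x) ^ 2) radius then pts ++ [(j, i)] else pts) pts
      = (PySem.List.pyRange left right 1).foldl (fun pts j =>
        if decide (center_x - dx ≤ j ∧ j ≤ center_x + dx) = true then pts ++ [(j, i)] else pts) pts := by
        apply PySem.List.foldl_congr_mem
        intro acc x hx
        rw [PySem.List.mem_pyRange_one] at hx
        rw [hcond x (by omega) (by omega)]
    _ = pts ++ ((PySem.List.pyRange left right 1).filter
          (fun j => decide (center_x - dx ≤ j ∧ j ≤ center_x + dx))).map (fun j => (j, i)) := hfold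
    _ = _ := by rw [filter_pyRange_interval]

-- ===== VERDICT (by name: the statement is the Claim_ definition above) =====
theorem generate_circle_points_spec : Claim_equal_generate_circle_points := by
  intro center_x center_y radius image_width image_height _ hpre
  unfold Spec_generate_circle_points generate_circle_points generate_circle_points_alt
  apply PySem.List.foldl_congr_mem
  intro acc i hi
  rw [PySem.List.mem_pyRange_one] at hi
  exact row_eq center_x center_y radius _ _ i hpre (by omega) (by omega) ⟨by omega, by omega⟩ acc
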